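-- pv_equiv track=rewrite | github.com/webdastur/binarysearchcom | easy/detect_voter_fraud.py | solve
-- ===== SOURCE A (Python) =====
-- def solve(votes):
--     cache = set()
--
--     for i in votes:
--         if i[1] in cache:
--             return True
--         else:
--             cache.add(i[1])
--     return False
-- ===== SOURCE B (Python) =====
-- def solve(votes):
--     seconds = [v[1] for v in votes]
--     return len(set(seconds)) != len(seconds)
-- ===== Notes on version B (the rewrite author's own statement) =====
-- stated objective: simpler
-- what changed: Replaces A's incremental membership-check loop with early exit by a batch decomposition: collect all second elements, then compare the count of distinct values with the total count.
import Mathlib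
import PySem

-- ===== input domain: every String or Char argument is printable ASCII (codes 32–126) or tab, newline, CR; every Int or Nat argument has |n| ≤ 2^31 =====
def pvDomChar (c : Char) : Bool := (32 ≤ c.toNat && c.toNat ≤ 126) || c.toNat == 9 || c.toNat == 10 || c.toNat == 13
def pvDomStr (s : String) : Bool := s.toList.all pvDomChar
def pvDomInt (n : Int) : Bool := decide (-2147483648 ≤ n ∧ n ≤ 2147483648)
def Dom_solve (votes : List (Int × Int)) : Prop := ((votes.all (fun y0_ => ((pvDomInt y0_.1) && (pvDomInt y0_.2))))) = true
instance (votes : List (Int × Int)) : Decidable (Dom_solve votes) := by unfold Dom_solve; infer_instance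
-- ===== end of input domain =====

-- B replaces A's incremental membership-check loop (early exit) by a batch
-- decomposition: collect the second elements, then compare distinct count to total count.

-- ===== PORT A =====
-- the 'for i in votes' loop with its early 'return True' and growing cache
def solveLoop (cache : PySem.Set Int) : List (Int × Int) → Bool
  | [] => false
  | i :: rest =>
    if PySem.Set.contains cache i.2 then true
    else solveLoop (PySem.Set.add cache i.2) rest

def solve (votes : List (Int × Int)) : Bool :=
  solveLoop PySem.Set.empty votes

-- ===== PORT B =====
def solve_alt (votes : List (Int × Int)) : Bool :=
  let seconds := votes.map (fun v => v.2)
  decide ((PySem.Set.ofList seconds).length ≠ seconds.length)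

-- ===== PRECONDITION & SPEC =====
def Spec_solve (votes : List (Int × Int)) (out : Bool) : Prop := out = solve_alt votes
instance (votes : List (Int × Int)) (out : Bool) : Decidable (Spec_solve votes out) := by unfold Spec_solve; infer_instance

-- ===== CLAIM (what is proved, stated in full; the proofs are below) =====
def Claim_equal_solve : Prop := ∀ (votes : List (Int × Int)), Dom_solve votes → Spec_solve votes (solve votes)

-- ===== LEMMAS AND PROOFS =====

theorem discard_of_not_mem (s : PySem.Set Int) (x : Int) (h : x ∉ s) :
    PySem.Set.discard s x = s := by
  simp [PySem.Set.discard, List.filter_eq_self]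
  intro a ha hax; exact h (hax ▸ ha)

theorem length_discard_lt (s : PySem.Set Int) (x : Int) (h : x ∈ s) :
    (PySem.Set.discard s x).length < s.length := by
  simp [PySem.Set.discard]; exact h

-- len(set(xs)) = len(xs) exactly when xs has no duplicates
theorem length_ofList_eq_iff (xs : List Int) :
    (PySem.Set.ofList xs).length = xs.length ↔ xs.Nodup := by
  induction xs with
  | nil => simp
  | cons x xs ih =>
    rw [PySem.Set.ofList_cons]
    by_cases hx : x ∈ xs
    · have hx' : x ∈ PySem.Set.ofList xs := (PySem.Set.mem_ofList xs x).mpr hx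
      have h1 := length_discard_lt _ _ hx'
      have h2 := PySem.Set.length_ofList_le (xs := xs)
      constructor
      · intro h; simp at h; omega
      · intro h; exact absurd hx (by simp [List.nodup_cons] at h; exact h.1)
    · have hx' : x ∉ PySem.Set.ofList xs := fun h => hx ((PySem.Set.mem_ofList xs x).mp h)
      rw [discard_of_not_mem _ _ hx']
      simp [List.nodup_cons, hx, ih]

-- characterisation of A's loop
theorem solveLoop_eq (l : List (Int × Int)) :
    ∀ cache : PySem.Set Int,
      solveLoop cache l =
        decide (¬ ((l.map (fun v => v.2)).Nodup ∧ ∀ x ∈ l, x.2 ∉ cache)) := by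
  induction l with
  | nil => intro cache; simp [solveLoop]
  | cons i rest ih =>
    intro cache
    by_cases hc : i.2 ∈ cache
    · have : PySem.Set.contains cache i.2 = true := (PySem.Set.contains_iff _ _).mpr hc
      simp only [solveLoop, this, if_true]
      rw [eq_comm, decide_eq_true_eq]
      rintro ⟨_, hall⟩
      exact hall i (List.mem_cons_self) hc
    · have : PySem.Set.contains cache i.2 ≠ true :=
        fun h => hc ((PySem.Set.contains_iff _ _).mp h)
      simp only [solveLoop, if_neg this]
      rw [ih]
      apply decide_eq_decide.mpr
      apply not_congr
      simp only [List.map_cons, List.nodup_cons, List.mem_map, List.mem_cons]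
      constructor
      · rintro ⟨hnd, hall⟩
        refine ⟨⟨?_, hnd⟩, ?_⟩
        · rintro ⟨x, hx, hx2⟩
          exact hall x hx ((PySem.Set.mem_add _ _ _).mpr (Or.inr hx2))
        · rintro x (rfl | hx)
          · exact hc
          · exact fun hmem => hall x hx ((PySem.Set.mem_add _ _ _).mpr (Or.inl hmem))
      · rintro ⟨⟨hni, hnd⟩, hall⟩
        refine ⟨hnd, fun x hx hmem => ?_⟩
        rcases (PySem.Set.mem_add _ _ _).mp hmem with h | h
        · exact hall x (Or.inr hx) h
        · exact hni ⟨x, hx, h⟩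

-- ===== VERDICT (by name: the statement is the Claim_ definition above) =====
theorem solve_spec : Claim_equal_solve := by
  intro votes _
  unfold Spec_solve solve solve_alt
  rw [solveLoop_eq]
  apply decide_eq_decide.mpr
  rw [ne_eq]
  apply not_congr
  have : ∀ x ∈ votes, x.2 ∉ (PySem.Set.empty : PySem.Set Int) := by
    intro x _ h; simp [PySem.Set.empty] at h
  rw [length_ofList_eq_iff]
  exact ⟨fun h => h.1, fun h => ⟨h, this⟩⟩
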